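-- pv_equiv track=rewrite | github.com/verba-neo/sw-camp-2nd-algo | prgmrs/121683-외톨이알파벳/장주언.py | solution
-- ===== SOURCE A (Python) =====
-- def solution(input_string):
--     # 알파벳 딕셔너리
--     char_dict = {}
--     # 답을 넣을 곳
--     answer_lst = []
--     # enumerate
--     for idx, char in enumerate(input_string):
--         # 알파벳 딕셔너리에 char가 없으면 새로 갱신
--         if char not in char_dict:
--             # idx 값 추가
--             char_dict[char] = [idx]
--         else:
--             # char가 있으면 idx값 추가
--             char_dict[char].append(idx)
--
--     for alphabet, idx_lst in char_dict.items():
--         # idx값의 길이가 2이상이면 두 번 넘게 나온것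
--         if len(idx_lst) >= 2:
--             # 음수,양수 일경우 두가지 다 설정 해줘야 답이나온다.
--             for i in range(len(idx_lst) -1):
--                 if idx_lst[i] - idx_lst[i+1] >= 0:
--                     if (idx_lst[i] - idx_lst[i + 1]) > 1:
--                         answer_lst.append(alphabet)
--                         break
--
--                 if idx_lst[i] - idx_lst[i+1] < 0:
--                     if -(idx_lst[i] - idx_lst[i + 1]) > 1:
--                         answer_lst.append(alphabet)
--                         break
--     # 답이 공백이면 N
--     if answer_lst == []:
--         answer = 'N'
--     # 아니면 소트해서 출력
--     else:
--         answer = ''.join(sorted(answer_lst))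
--
--     return answer
-- ===== SOURCE B (Python) =====
-- def solution(input_string):
--     # One pass: per letter keep (first index, last index, count);
--     # a letter is lonely iff count >= 2 and its span != count.
--     stats = {}
--     for i, ch in enumerate(input_string):
--         if ch in stats:
--             first, _, cnt = stats[ch]
--             stats[ch] = (first, i, cnt + 1)
--         else:
--             stats[ch] = (i, i, 1)
--     lonely = [ch for ch, (first, last, cnt) in stats.items()
--               if cnt >= 2 and last - first + 1 != cnt]
--     return 'N' if not lonely else ''.join(sorted(lonely))
-- ===== Notes on version B (the rewrite author's own statement) =====
-- stated objective: simpler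
-- what changed: Replaces A's per-letter index-list dict plus a second adjacent-gap scan with a single pass keeping only (first,last,count) per letter and a closed-form span-vs-count test (lonely iff count>=2 and last-first+1 != count).
import Mathlib
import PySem

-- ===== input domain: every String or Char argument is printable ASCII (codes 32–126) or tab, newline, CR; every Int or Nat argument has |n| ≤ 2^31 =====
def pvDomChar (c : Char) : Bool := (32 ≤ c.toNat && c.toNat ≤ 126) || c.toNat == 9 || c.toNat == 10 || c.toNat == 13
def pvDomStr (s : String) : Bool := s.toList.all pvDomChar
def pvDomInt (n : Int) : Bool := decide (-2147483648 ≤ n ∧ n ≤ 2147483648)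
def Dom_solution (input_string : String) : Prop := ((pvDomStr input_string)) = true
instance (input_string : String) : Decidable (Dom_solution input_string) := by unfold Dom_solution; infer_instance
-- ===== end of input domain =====

-- B keeps only (first,last,count) per letter and uses a span-vs-count test, instead of
-- A's per-letter index lists plus an adjacent-gap scan; objective: simpler.

-- ===== PORT A =====
-- inner 'for i in range(len(idx_lst)-1): … break' loop of A (break after one append = any)
def lonelyScanA (idx_lst : List Int) : Bool :=
  (PySem.List.pyRange 0 ((idx_lst.length : Int) - 1) 1).any (fun i =>
    (if PySem.List.pyGetD idx_lst i 0 - PySem.List.pyGetD idx_lst (i+1) 0 ≥ 0 then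
       decide (PySem.List.pyGetD idx_lst i 0 - PySem.List.pyGetD idx_lst (i+1) 0 > 1)
     else false) ||
    (if PySem.List.pyGetD idx_lst i 0 - PySem.List.pyGetD idx_lst (i+1) 0 < 0 then
       decide (-(PySem.List.pyGetD idx_lst i 0 - PySem.List.pyGetD idx_lst (i+1) 0) > 1)
     else false))

def solution (input_string : String) : String :=
  let char_dict : PySem.Dict Char (List Int) :=
    (PySem.List.enumerate input_string.toList 0).foldl
      (fun d p =>
        if d.contains p.2 = false then d.insert p.2 [p.1]
        else d.modify p.2 [] (fun l => l ++ [p.1]))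
      PySem.Dict.empty
  let answer_lst : List Char :=
    char_dict.items.foldl
      (fun acc q =>
        if q.2.length ≥ 2 then
          (if lonelyScanA q.2 then acc ++ [q.1] else acc)
        else acc)
      []
  if answer_lst = [] then "N"
  else String.ofList (PySem.List.sorted answer_lst (fun c => c) false)

-- ===== PORT B =====
def solution_alt (input_string : String) : String :=
  let stats : PySem.Dict Char (Int × Int × Int) :=
    (PySem.List.enumerate input_string.toList 0).foldl
      (fun d p =>
        match d.get? p.2 with
        | some t => d.insert p.2 (t.1, p.1, t.2.2 + 1)
        | none => d.insert p.2 (p.1, p.1, 1))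
      PySem.Dict.empty
  let lonely : List Char :=
    stats.items.filterMap (fun q =>
      if q.2.2.2 ≥ 2 ∧ q.2.2.1 - q.2.1 + 1 ≠ q.2.2.2 then some q.1 else none)
  if lonely = [] then "N"
  else String.ofList (PySem.List.sorted lonely (fun c => c) false)

-- ===== PRECONDITION & SPEC =====
def Spec_solution (input_string : String) (out : String) : Prop := out = solution_alt input_string
instance (input_string : String) (out : String) : Decidable (Spec_solution input_string out) := by unfold Spec_solution; infer_instance

-- ===== CLAIM (what is proved, stated in full; the proofs are below) =====
def Claim_equal_solution : Prop := ∀ (input_string : String), Dom_solution input_string → Spec_solution input_string (solution input_string)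

-- ===== LEMMAS AND PROOFS =====

-- the two loop bodies, named for the proofs
def stepA (d : PySem.Dict Char (List Int)) (p : Int × Char) : PySem.Dict Char (List Int) :=
  if d.contains p.2 = false then d.insert p.2 [p.1] else d.modify p.2 [] (fun l => l ++ [p.1])

def stepB (d : PySem.Dict Char (Int × Int × Int)) (p : Int × Char) : PySem.Dict Char (Int × Int × Int) :=
  match d.get? p.2 with
  | some t => d.insert p.2 (t.1, p.1, t.2.2 + 1)
  | none => d.insert p.2 (p.1, p.1, 1)

-- value relation: B's triple is (head, last, length) of A's index list, which is a
-- strictly increasing list of indices all below the next enumeration index k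
def RelV (k : Int) (l : List Int) (v : Int × Int × Int) : Prop :=
  ∃ h : l ≠ [], v.1 = l.head h ∧ v.2.1 = l.getLast h ∧ v.2.2 = (l.length : Int) ∧
    l.IsChain (· < ·) ∧ ∀ x ∈ l, x < k

def DInv (k : Int) (dA : PySem.Dict Char (List Int)) (dB : PySem.Dict Char (Int × Int × Int)) : Prop :=
  dA.keys = dB.keys ∧ dA.keys.Nodup ∧
  ∀ c, dA.contains c = true → RelV k (dA.getD c []) (dB.getD c (0, 0, 0))

lemma Inv_empty : DInv 0 PySem.Dict.empty PySem.Dict.empty := by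
  refine ⟨rfl, by simp [PySem.Dict.keys_empty], ?_⟩
  intro c hc
  rw [PySem.Dict.contains_empty] at hc
  exact absurd hc (by simp)

lemma Inv_step (k : Int) (c : Char) (dA : PySem.Dict Char (List Int))
    (dB : PySem.Dict Char (Int × Int × Int)) (h : DInv k dA dB) :
    DInv (k + 1) (stepA dA (k, c)) (stepB dB (k, c)) := by
  obtain ⟨hkeys, hnd, hrel⟩ := h
  have hcont : ∀ c', dB.contains c' = dA.contains c' := by
    intro c'
    rw [PySem.Dict.contains_eq_decide_mem_keys, PySem.Dict.contains_eq_decide_mem_keys, hkeys]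
  by_cases hc : dA.contains c = true
  · -- key already present: A appends k, B bumps (first, last, count)
    have hBc : dB.contains c = true := by rw [hcont]; exact hc
    obtain ⟨v, hv⟩ : ∃ v, dB.get? c = some v := by
      have h1 := PySem.Dict.contains_eq_isSome_get? dB c
      rw [hBc] at h1
      exact Option.isSome_iff_exists.mp h1.symm
    have hsA : stepA dA (k, c) = dA.modify c [] (fun l => l ++ [k]) := by
      simp [stepA, hc]
    have hsB : stepB dB (k, c) = dB.insert c (v.1, k, v.2.2 + 1) := by
      simp [stepB, hv]
    rw [hsA, hsB]
    have hkA : (dA.modify c [] (fun l => l ++ [k])).keys = dA.keys := by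
      rw [PySem.Dict.keys_modify, PySem.Dict.keys_insert_of_contains _ _ hc]
    have hkB : (dB.insert c (v.1, k, v.2.2 + 1)).keys = dB.keys :=
      PySem.Dict.keys_insert_of_contains _ _ hBc
    refine ⟨by rw [hkA, hkB, hkeys], by rw [hkA]; exact hnd, ?_⟩
    intro c' hc'
    by_cases hcc : c' = c
    · subst hcc
      rw [PySem.Dict.getD_modify_self, PySem.Dict.getD_insert_self]
      have hvv : dB.getD c' (0, 0, 0) = v := PySem.Dict.getD_of_get?_eq_some _ _ hv
      obtain ⟨hne, h1, h2, h3, h4, h5⟩ := hrel c' hc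
      rw [hvv] at h1 h2 h3
      refine ⟨by simp, ?_, ?_, ?_, ?_, ?_⟩
      · rw [h1]; exact (List.head_append_of_ne_nil hne).symm
      · simp
      · simp [h3]
      · refine List.IsChain.append h4 (by simp) ?_
        intro x hx y hy
        simp at hy
        subst hy
        exact h5 x (List.mem_of_mem_getLast? hx)
      · intro x hx
        rcases List.mem_append.mp hx with hx | hx
        · exact lt_trans (h5 x hx) (by omega)
        · simp at hx; omega
    · rw [PySem.Dict.getD_modify_of_ne _ _ _ hcc, PySem.Dict.getD_insert_of_ne _ _ _ hcc]
      have hc'' : dA.contains c' = true := by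
        rw [PySem.Dict.contains_modify] at hc'
        simpa [hcc] using hc'
      obtain ⟨hne, h1, h2, h3, h4, h5⟩ := hrel c' hc''
      exact ⟨hne, h1, h2, h3, h4, fun x hx => lt_trans (h5 x hx) (by omega)⟩
  · -- new key: both append a fresh entry
    have hc0 : dA.contains c = false := by simpa using hc
    have hBc : dB.contains c = false := by rw [hcont]; exact hc0
    have hv : dB.get? c = none := (PySem.Dict.get?_eq_none_iff_contains dB c).mpr hBc
    have hsA : stepA dA (k, c) = dA.insert c [k] := by simp [stepA, hc0]
    have hsB : stepB dB (k, c) = dB.insert c (k, k, 1) := by simp [stepB, hv]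
    rw [hsA, hsB]
    refine ⟨?_, PySem.Dict.nodup_keys_insert _ _ _ hnd, ?_⟩
    · rw [PySem.Dict.keys_insert_of_not_contains _ _ hc0,
        PySem.Dict.keys_insert_of_not_contains _ _ hBc, hkeys]
    · intro c' hc'
      by_cases hcc : c' = c
      · subst hcc
        rw [PySem.Dict.getD_insert_self, PySem.Dict.getD_insert_self]
        exact ⟨by simp, by simp, by simp, by simp, by simp, by intro x hx; simp at hx; omega⟩
      · rw [PySem.Dict.getD_insert_of_ne _ _ _ hcc, PySem.Dict.getD_insert_of_ne _ _ _ hcc]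
        have hc'' : dA.contains c' = true := by
          rw [PySem.Dict.contains_insert] at hc'
          simpa [hcc] using hc'
        obtain ⟨hne, h1, h2, h3, h4, h5⟩ := hrel c' hc''
        exact ⟨hne, h1, h2, h3, h4, fun x hx => lt_trans (h5 x hx) (by omega)⟩

lemma Inv_fold : ∀ (s : List Char) (k : Int) (dA : PySem.Dict Char (List Int))
    (dB : PySem.Dict Char (Int × Int × Int)), DInv k dA dB →
    ∃ m, DInv m ((PySem.List.enumerate s k).foldl stepA dA)
      ((PySem.List.enumerate s k).foldl stepB dB)
  | [], k, dA, dB, h => ⟨k, by simpa [PySem.List.enumerate_nil] using h⟩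
  | c :: t, k, dA, dB, h => by
      rw [PySem.List.enumerate_cons]
      simp only [List.foldl_cons]
      exact Inv_fold t (k + 1) _ _ (Inv_step k c dA dB h)

-- span of a strictly increasing nonempty list is at least its tail length
lemma span_ge : ∀ (t : List Int) (x : Int), (x :: t).IsChain (· < ·) →
    (t.length : Int) ≤ (x :: t).getLast (List.cons_ne_nil x t) - x := by
  intro t
  induction t with
  | nil => intro x _; simp
  | cons y t' ih =>
    intro x hch
    obtain ⟨hxy, hch'⟩ := List.isChain_cons_cons.mp hch
    have h2 := ih y hch'
    rw [List.getLast_cons (List.cons_ne_nil y t')]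
    simp only [List.length_cons]
    push_cast
    omega

-- span equals tail length iff every adjacent gap is exactly 1
lemma span_eq_iff : ∀ (t : List Int) (x : Int), (x :: t).IsChain (· < ·) →
    ((x :: t).getLast (List.cons_ne_nil x t) - x = (t.length : Int) ↔
      (x :: t).IsChain (fun a b => b = a + 1)) := by
  intro t
  induction t with
  | nil => intro x _; simp
  | cons y t' ih =>
    intro x hch
    obtain ⟨hxy, hch'⟩ := List.isChain_cons_cons.mp hch
    have hge := span_ge t' y hch'
    rw [List.getLast_cons (List.cons_ne_nil y t'), List.isChain_cons_cons, ← ih y hch']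
    simp only [List.length_cons]
    push_cast
    omega

-- A's inner scan finds an adjacent pair more than 1 apart
lemma scan_iff (l : List Int) (hch : l.IsChain (· < ·)) :
    lonelyScanA l = true ↔ ∃ (i : Nat) (_h : i + 1 < l.length), l[i + 1] - l[i] > 1 := by
  unfold lonelyScanA
  rw [PySem.List.pyRange_one]
  simp only [List.any_map, List.any_eq_true, List.mem_range, Function.comp]
  constructor
  · rintro ⟨k, hk, hcond⟩
    have hk' : k + 1 < l.length := by omega
    have ha : PySem.List.pyGetD l (0 + (k : Int)) 0 = l[k] := by
      rw [zero_add, PySem.List.pyGetD_natCast, List.getD_eq_getElem _ _ (by omega)]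
    have hb : PySem.List.pyGetD l (0 + (k : Int) + 1) 0 = l[k + 1] := by
      rw [zero_add, show ((k : Int) + 1) = ((k + 1 : Nat) : Int) by push_cast; ring,
        PySem.List.pyGetD_natCast, List.getD_eq_getElem _ _ hk']
    rw [ha, hb] at hcond
    have hlt : l[k] < l[k + 1] := List.isChain_iff_getElem.mp hch k hk'
    rw [if_neg (by omega), if_pos (by omega)] at hcond
    simp at hcond
    exact ⟨k, hk', by omega⟩
  · rintro ⟨i, hi, hgap⟩
    refine ⟨i, by omega, ?_⟩
    have ha : PySem.List.pyGetD l (0 + (i : Int)) 0 = l[i] := by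
      rw [zero_add, PySem.List.pyGetD_natCast, List.getD_eq_getElem _ _ (by omega)]
    have hb : PySem.List.pyGetD l (0 + (i : Int) + 1) 0 = l[i + 1] := by
      rw [zero_add, show ((i : Int) + 1) = ((i + 1 : Nat) : Int) by push_cast; ring,
        PySem.List.pyGetD_natCast, List.getD_eq_getElem _ _ hi]
    have hlt : l[i] < l[i + 1] := List.isChain_iff_getElem.mp hch i hi
    rw [ha, hb, if_neg (by omega), if_pos (by omega)]
    simp
    omega

-- per-key equality of A's flag and B's flag
lemma flag_eq (m : Int) (l : List Int) (v : Int × Int × Int) (h : RelV m l v) :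
    (decide (2 ≤ l.length) && lonelyScanA l) = decide (v.2.2 ≥ 2 ∧ v.2.1 - v.1 + 1 ≠ v.2.2) := by
  obtain ⟨hne, h1, h2, h3, hch, -⟩ := h
  obtain ⟨x, t, rfl⟩ : ∃ x t, l = x :: t := by
    cases l with
    | nil => exact absurd rfl hne
    | cons x t => exact ⟨x, t, rfl⟩
  rw [h1, h2, h3, Bool.eq_iff_iff]
  simp only [Bool.and_eq_true, decide_eq_true_eq, List.head_cons, List.length_cons]
  cases t with
  | nil =>
    -- single occurrence: both flags false
    simp only [List.length_nil, List.getLast_singleton]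
    constructor
    · rintro ⟨hh, -⟩; omega
    · rintro ⟨-, hh⟩; push_cast at hh; omega
  | cons y t' =>
    have hspan := span_eq_iff (y :: t') x hch
    have hgespan := span_ge (y :: t') x hch
    have hiff : lonelyScanA (x :: y :: t') = true ↔
        (x :: y :: t').getLast (List.cons_ne_nil _ _) - x ≠ ((y :: t').length : Int) := by
      rw [scan_iff _ hch]
      constructor
      · rintro ⟨i, hi, hgap⟩ heq
        have hc1 := hspan.mp heq
        have := List.isChain_iff_getElem.mp hc1 i hi
        omega
      · intro hne'
        have hnc : ¬ (x :: y :: t').IsChain (fun a b => b = a + 1) := fun hc => hne' (hspan.mpr hc)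
        rw [List.isChain_iff_getElem] at hnc
        push Not at hnc
        obtain ⟨i, hi, hnei⟩ := hnc
        have hlt := List.isChain_iff_getElem.mp hch i hi
        exact ⟨i, hi, by omega⟩
    rw [List.getLast_cons (List.cons_ne_nil y t')] at hiff hgespan ⊢
    simp only [List.length_cons] at hiff hgespan ⊢
    push_cast at hiff hgespan ⊢
    constructor
    · rintro ⟨-, hsc⟩
      have hx := hiff.mp hsc
      exact ⟨by omega, by omega⟩
    · rintro ⟨-, hsp⟩
      exact ⟨trivial, hiff.mpr (by omega)⟩

-- a Prop-guarded filterMap is filter-then-map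
lemma filterMap_ite {α β : Type} (p : α → Prop) [DecidablePred p] (f : α → β) (l : List α) :
    l.filterMap (fun x => if p x then some (f x) else none) =
      (l.filter (fun x => decide (p x))).map f := by
  induction l with
  | nil => rfl
  | cons x t ih =>
    by_cases h : p x <;> simp [h, ih]

-- the two answer lists coincide
lemma answers_eq (m : Int) (dA : PySem.Dict Char (List Int))
    (dB : PySem.Dict Char (Int × Int × Int)) (h : DInv m dA dB) :
    dA.items.foldl
      (fun acc q =>
        if q.2.length ≥ 2 then (if lonelyScanA q.2 then acc ++ [q.1] else acc) else acc)
      ([] : List Char)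
    = dB.items.filterMap (fun q =>
        if q.2.2.2 ≥ 2 ∧ q.2.2.1 - q.2.1 + 1 ≠ q.2.2.2 then some q.1 else none) := by
  obtain ⟨hkeys, hnd, hrel⟩ := h
  have hndB : dB.keys.Nodup := hkeys ▸ hnd
  have hfunA : (fun (acc : List Char) (q : Char × List Int) =>
        if q.2.length ≥ 2 then (if lonelyScanA q.2 then acc ++ [q.1] else acc) else acc)
      = (fun acc q =>
        if ((decide (2 ≤ q.2.length) && lonelyScanA q.2)) = true then acc ++ [q.1] else acc) := by
    funext acc q
    by_cases h1 : 2 ≤ q.2.length <;> by_cases h2 : lonelyScanA q.2 = true <;> simp [h1, h2]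
  rw [hfunA, PySem.List.foldl_append_if, filterMap_ite,
    PySem.Dict.items_eq_map_keys dA hnd [], PySem.Dict.items_eq_map_keys dB hndB (0, 0, 0),
    List.filter_map, List.filter_map, List.map_map, List.map_map, hkeys]
  simp only [List.nil_append]
  congr 1
  apply List.filter_congr
  intro c hcmem
  have hc : dA.contains c = true := (PySem.Dict.contains_iff_mem_keys dA c).mpr (hkeys ▸ hcmem)
  exact flag_eq m _ _ (hrel c hc)

-- ===== VERDICT (by name: the statement is the Claim_ definition above) =====
theorem solution_spec : Claim_equal_solution := by
  intro s _
  unfold Spec_solution solution solution_alt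
  have hA : (fun (d : PySem.Dict Char (List Int)) (p : Int × Char) =>
      if d.contains p.2 = false then d.insert p.2 [p.1]
      else d.modify p.2 [] (fun l => l ++ [p.1])) = stepA := rfl
  have hB : (fun (d : PySem.Dict Char (Int × Int × Int)) (p : Int × Char) =>
      match d.get? p.2 with
      | some t => d.insert p.2 (t.1, p.1, t.2.2 + 1)
      | none => d.insert p.2 (p.1, p.1, 1)) = stepB := rfl
  rw [hA, hB]
  obtain ⟨m, hinv⟩ := Inv_fold s.toList 0 PySem.Dict.empty PySem.Dict.empty Inv_empty
  exact congrArg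
    (fun L : List Char => if L = [] then "N" else String.ofList (PySem.List.sorted L (fun c => c) false))
    (answers_eq m _ _ hinv)
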